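-- pv_equiv track=rewrite | github.com/DivyarajKathait/I-am-a-Walrus | Sudoku-Solver.py | valid_list
-- ===== SOURCE A (Python) =====
-- from typing import Tuple, List
--
-- def valid_list(lst: List[int])-> bool:
-- 	"""This function takes a lists as an input and returns true if the given list is valid.
-- 	The list will be a single block , single row or single column only.
-- 	A valid list is defined as a list in which all non empty elements doesn't have a repeating element.
-- 	"""
-- 	# your code goes here
-- 	for x in range (len(lst)):
-- 		if(lst[x]!=0):
-- 			if(lst.count(lst[x])==1):
-- 				continue
-- 			else:
-- 				return False
-- 	return True
-- ===== SOURCE B (Python) =====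
-- def valid_list(lst):
--     """True iff the non-zero elements of lst contain no duplicates."""
--     nz = [v for v in lst if v != 0]
--     return len(nz) == len(set(nz))
-- ===== Notes on version B (the rewrite author's own statement) =====
-- stated objective: simpler
-- what changed: Replaces the index loop with a per-element rescan via lst.count by one filter pass plus a set-cardinality comparison (len(nz) == len(set(nz))).
import Mathlib
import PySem

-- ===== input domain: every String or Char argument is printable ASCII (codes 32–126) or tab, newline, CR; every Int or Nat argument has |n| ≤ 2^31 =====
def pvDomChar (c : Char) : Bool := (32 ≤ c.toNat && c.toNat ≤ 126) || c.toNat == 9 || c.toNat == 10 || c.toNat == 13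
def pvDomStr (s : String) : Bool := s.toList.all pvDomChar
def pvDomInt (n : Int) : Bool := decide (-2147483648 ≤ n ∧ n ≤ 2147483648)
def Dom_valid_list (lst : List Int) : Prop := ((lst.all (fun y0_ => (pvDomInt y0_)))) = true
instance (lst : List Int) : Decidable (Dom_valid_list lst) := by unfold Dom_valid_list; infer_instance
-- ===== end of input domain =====

-- B checks duplicate-freeness of the non-zero elements by one filter pass and a set-cardinality comparison instead of A's per-index rescan with .count.

-- ===== PORT A =====
-- the `for x in range(len(lst))` loop; lst[x] is always in range (x ∈ range(len(lst))),
-- so pyGetD is exact here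
def validListLoop (lst : List Int) : List Int → Bool
  | [] => true
  | x :: rest =>
    if PySem.List.pyGetD lst x 0 ≠ 0 then
      if PySem.List.count lst (PySem.List.pyGetD lst x 0) == 1 then validListLoop lst rest
      else false
    else validListLoop lst rest

def valid_list (lst : List Int) : Bool :=
  validListLoop lst (PySem.List.pyRange 0 (PySem.List.len lst) 1)

-- ===== PORT B =====
def valid_list_alt (lst : List Int) : Bool :=
  let nz := lst.filter (fun v => decide (v ≠ 0))
  PySem.List.len nz == PySem.Set.len (PySem.Set.ofList nz)

-- ===== PRECONDITION & SPEC =====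
def Spec_valid_list (lst : List Int) (out : Bool) : Prop := out = valid_list_alt lst
instance (lst : List Int) (out : Bool) : Decidable (Spec_valid_list lst out) := by unfold Spec_valid_list; infer_instance

-- ===== CLAIM (what is proved, stated in full; the proofs are below) =====
def Claim_equal_valid_list : Prop := ∀ (lst : List Int), Dom_valid_list lst → Spec_valid_list lst (valid_list lst)

-- ===== LEMMAS AND PROOFS =====

theorem validListLoop_eq_true_iff (lst : List Int) (idxs : List Int) :
    validListLoop lst idxs = true ↔
      ∀ x ∈ idxs, PySem.List.pyGetD lst x 0 ≠ 0 →
        PySem.List.count lst (PySem.List.pyGetD lst x 0) = 1 := by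
  induction idxs with
  | nil => simp [validListLoop]
  | cons x rest ih =>
    simp only [validListLoop]
    split_ifs with h1 h2 <;> simp_all

theorem valid_list_eq_true_iff (lst : List Int) :
    valid_list lst = true ↔ ∀ v ∈ lst, v ≠ 0 → lst.count v = 1 := by
  unfold valid_list
  rw [validListLoop_eq_true_iff]
  have h := PySem.List.map_pyGetD_pyRange_zero lst (0 : Int)
  constructor
  · intro H v hv hne
    have hv' : v ∈ (PySem.List.pyRange 0 (PySem.List.len lst) 1).map
        (fun j => PySem.List.pyGetD lst j 0) := by rw [h]; exact hv
    obtain ⟨x, hx, hfx⟩ := List.mem_map.mp hv'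
    have := H x hx (by rw [hfx]; exact hne)
    rw [hfx] at this
    simpa [PySem.List.count_eq] using this
  · intro H x hx hne
    have hv : PySem.List.pyGetD lst x 0 ∈ lst := by
      have hm := List.mem_map_of_mem (f := fun j => PySem.List.pyGetD lst j 0) hx
      rw [h] at hm; exact hm
    simpa [PySem.List.count_eq] using H _ hv hne

theorem length_foldl_add_le (l s : List Int) :
    (l.foldl PySem.Set.add s).length ≤ s.length + l.length := by
  induction l generalizing s with
  | nil => simp
  | cons x t ih =>
    simp only [List.foldl_cons]
    calc (t.foldl PySem.Set.add (PySem.Set.add s x)).length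
        ≤ (PySem.Set.add s x).length + t.length := ih _
      _ ≤ (s.length + 1) + t.length := by
          unfold PySem.Set.add; split_ifs <;> simp
      _ = s.length + (x :: t).length := by simp; omega

theorem length_foldl_add_iff (l s : List Int) (hs : s.Nodup) :
    (l.foldl PySem.Set.add s).length = s.length + l.length ↔ (s ++ l).Nodup := by
  induction l generalizing s with
  | nil => simp [hs]
  | cons x t ih =>
    simp only [List.foldl_cons]
    by_cases hx : x ∈ s
    · have hadd : PySem.Set.add s x = s := by
        unfold PySem.Set.add PySem.Set.contains
        simp [hx]
      rw [hadd]
      constructor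
      · intro hlen
        exfalso
        have := length_foldl_add_le t s
        simp [List.length_cons] at hlen
        omega
      · intro hnd
        exfalso
        have hsub : (s ++ [x]).Sublist (s ++ x :: t) :=
          List.Sublist.append_left (List.cons_sublist_cons.mpr (List.nil_sublist t)) s
        have := hnd.sublist hsub
        simp [List.nodup_append] at this
        exact this.2 x hx rfl
    · have hadd : PySem.Set.add s x = s ++ [x] := by
        unfold PySem.Set.add PySem.Set.contains
        simp [hx]
      rw [hadd]
      have hs' : (s ++ [x]).Nodup := by
        refine List.Nodup.append hs (List.nodup_singleton x) ?_
        intro a ha hax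
        simp at hax
        exact hx (hax ▸ ha)
      have harith : s.length + (x :: t).length = (s ++ [x]).length + t.length := by
        simp; omega
      rw [harith, ih _ hs']
      have : s ++ [x] ++ t = s ++ x :: t := by simp
      rw [this]

theorem valid_list_alt_eq_true_iff (lst : List Int) :
    valid_list_alt lst = true ↔ (lst.filter (fun v => decide (v ≠ 0))).Nodup := by
  unfold valid_list_alt
  set nz := lst.filter (fun v => decide (v ≠ 0)) with hnz
  have hof : PySem.Set.ofList nz = nz.foldl PySem.Set.add [] := PySem.Set.ofList_eq_foldl nz
  have key := length_foldl_add_iff nz [] List.nodup_nil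
  simp only [List.length_nil, Nat.zero_add, List.nil_append] at key
  simp only [PySem.List.len, PySem.Set.len, hof, beq_iff_eq, Nat.cast_inj]
  constructor
  · intro h; exact key.mp h.symm
  · intro h; exact (key.mpr h).symm

theorem nodup_filter_iff_count (lst : List Int) :
    (lst.filter (fun v => decide (v ≠ 0))).Nodup ↔ ∀ v ∈ lst, v ≠ 0 → lst.count v = 1 := by
  rw [List.nodup_iff_count_le_one]
  constructor
  · intro H v hv hne
    have h1 : (lst.filter (fun v => decide (v ≠ 0))).count v = lst.count v := by
      rw [List.count_filter (by simp [hne])]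
    have h2 : 0 < lst.count v := List.count_pos_iff.mpr hv
    have := H v
    rw [h1] at this
    omega
  · intro H v
    by_cases hv0 : v = 0
    · subst hv0
      have h0 : (lst.filter (fun v => decide (v ≠ 0))).count 0 = 0 :=
        List.count_eq_zero.mpr (by simp)
      omega
    · rw [List.count_filter (by simp [hv0])]
      by_cases hv : v ∈ lst
      · simp [H v hv hv0]
      · simp [List.count_eq_zero_of_not_mem hv]

-- ===== VERDICT (by name: the statement is the Claim_ definition above) =====
theorem valid_list_spec : Claim_equal_valid_list := by
  intro lst _
  unfold Spec_valid_list
  rw [Bool.eq_iff_iff, valid_list_eq_true_iff, valid_list_alt_eq_true_iff,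
    nodup_filter_iff_count]
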